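-- pv_equiv track=rewrite | github.com/KailasVS666/boltdev-beachhack | csv_output/explainability.py | _identify_required_parts
-- ===== SOURCE A (Python) =====
-- from typing import List, Tuple, Dict, Optional
--
-- def _identify_required_parts(top_features: List[Dict]) -> List[str]:
--     """
--     Identify parts that should be staged based on sensor anomalies
--
--     Args:
--         top_features: Top contributing sensors
--
--     Returns:
--         List of part descriptions
--     """
--     parts = []
--
--     for feature in top_features[:3]:
--         sensor = feature['name']
--
--         if 'T50' in sensor or 'LPT' in sensor:
--             parts.append("LPT blade set (PN: TBD)")
--             parts.append("LPT nozzle guide vanes (PN: TBD)")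
--         elif 'T30' in sensor or 'HPC' in sensor:
--             parts.append("HPC blade set (PN: TBD)")
--             parts.append("HPC seals (PN: TBD)")
--         elif 'P30' in sensor or 'P15' in sensor:
--             parts.append("Pressure seals and gaskets (PN: TBD)")
--         elif 'Nf' in sensor or 'Nc' in sensor:
--             parts.append("Rotor bearings (PN: TBD)")
--             parts.append("Fan blade set (PN: TBD)")
--         elif 'fuel' in sensor.lower() or 'phi' in sensor:
--             parts.append("Fuel nozzles (PN: TBD)")
--
--     # Remove duplicates
--     unique_parts = list(dict.fromkeys(parts))
--
--     return unique_parts if unique_parts else ["To be determined based on inspection findings"]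
-- ===== SOURCE B (Python) =====
-- from typing import List, Tuple, Dict, Optional
--
-- # category index -> parts emitted for that category
-- _CATEGORY_PARTS = {
--     0: ["LPT blade set (PN: TBD)", "LPT nozzle guide vanes (PN: TBD)"],
--     1: ["HPC blade set (PN: TBD)", "HPC seals (PN: TBD)"],
--     2: ["Pressure seals and gaskets (PN: TBD)"],
--     3: ["Rotor bearings (PN: TBD)", "Fan blade set (PN: TBD)"],
--     4: ["Fuel nozzles (PN: TBD)"],
-- }
--
-- # (keyword, category, case_sensitive)
-- _KEYWORDS = [
--     ("T50", 0, True), ("LPT", 0, True),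
--     ("T30", 1, True), ("HPC", 1, True),
--     ("P30", 2, True), ("P15", 2, True),
--     ("Nf", 3, True), ("Nc", 3, True),
--     ("fuel", 4, False), ("phi", 4, True),
-- ]
--
-- def _category(sensor: str) -> Optional[int]:
--     """Lowest-numbered category whose keyword occurs in the sensor name."""
--     low = sensor.lower()
--     matches = [cat for kw, cat, cs in _KEYWORDS
--                if kw in (sensor if cs else low)]
--     return min(matches) if matches else None
--
-- def _identify_required_parts(top_features: List[Dict]) -> List[str]:
--     cats = []
--     for feature in top_features[:3]:
--         c = _category(feature['name'])
--         if c is not None and c not in cats: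
--             cats.append(c)
--     parts = [p for c in cats for p in _CATEGORY_PARTS[c]]
--     return parts or ["To be determined based on inspection findings"]
-- ===== Notes on version B (the rewrite author's own statement) =====
-- stated objective: alternative
-- what changed: Instead of A's if/elif cascade appending part strings and deduplicating parts at the end, B classifies each sensor to a numeric category as the minimum over all matching keywords, deduplicates at the category level, and only then expands categories to part strings (correct because distinct categories emit disjoint, internally duplicate-free part blocks).
-- outside the precondition, e.g. on _identify_required_parts([{}]): A raises KeyError, B raises KeyError
import Mathlib
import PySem

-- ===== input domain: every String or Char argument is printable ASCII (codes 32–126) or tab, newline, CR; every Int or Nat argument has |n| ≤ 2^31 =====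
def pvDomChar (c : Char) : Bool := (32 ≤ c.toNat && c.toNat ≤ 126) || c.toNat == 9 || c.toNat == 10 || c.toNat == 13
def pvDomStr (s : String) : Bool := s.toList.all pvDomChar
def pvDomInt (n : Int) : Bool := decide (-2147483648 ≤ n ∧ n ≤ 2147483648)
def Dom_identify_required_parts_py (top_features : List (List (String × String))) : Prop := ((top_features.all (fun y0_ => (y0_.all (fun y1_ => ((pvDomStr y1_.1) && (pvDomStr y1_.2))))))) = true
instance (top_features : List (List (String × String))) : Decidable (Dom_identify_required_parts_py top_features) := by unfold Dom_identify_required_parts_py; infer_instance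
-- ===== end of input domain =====

-- B classifies each sensor to a numeric category (min over matching keywords), dedups categories, then expands to parts; same return value as A.

-- ===== PORT A =====
-- A's if/elif cascade over the sensor name; each branch appends its fixed part strings.
def pvPartsA (sensor : String) : List String :=
  if PySem.Str.isIn "T50" sensor || PySem.Str.isIn "LPT" sensor then
    ["LPT blade set (PN: TBD)", "LPT nozzle guide vanes (PN: TBD)"]
  else if PySem.Str.isIn "T30" sensor || PySem.Str.isIn "HPC" sensor then
    ["HPC blade set (PN: TBD)", "HPC seals (PN: TBD)"]
  else if PySem.Str.isIn "P30" sensor || PySem.Str.isIn "P15" sensor then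
    ["Pressure seals and gaskets (PN: TBD)"]
  else if PySem.Str.isIn "Nf" sensor || PySem.Str.isIn "Nc" sensor then
    ["Rotor bearings (PN: TBD)", "Fan blade set (PN: TBD)"]
  else if PySem.Str.isIn "fuel" (PySem.Str.lower sensor) || PySem.Str.isIn "phi" sensor then
    ["Fuel nozzles (PN: TBD)"]
  else []

def identify_required_parts_py (top_features : List (List (String × String))) : List String :=
  -- top_features[:3] = take 3; feature['name'] = first match in the assoc list (Pre_ guarantees it exists)
  let parts := (top_features.take 3).foldl
    (fun acc feature => acc ++ pvPartsA ((feature.lookup "name").getD "")) []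
  let unique_parts := PySem.List.dedup parts
  if unique_parts = [] then ["To be determined based on inspection findings"] else unique_parts

-- ===== PORT B =====
-- _CATEGORY_PARTS: category index -> parts (keys 0..4; always present, so the dict lookup is getD [])
def pvCatParts : List (Int × List String) :=
  [(0, ["LPT blade set (PN: TBD)", "LPT nozzle guide vanes (PN: TBD)"]),
   (1, ["HPC blade set (PN: TBD)", "HPC seals (PN: TBD)"]),
   (2, ["Pressure seals and gaskets (PN: TBD)"]),
   (3, ["Rotor bearings (PN: TBD)", "Fan blade set (PN: TBD)"]),
   (4, ["Fuel nozzles (PN: TBD)"])]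

-- _KEYWORDS: (keyword, category, case_sensitive)
def pvKeywords : List (String × Int × Bool) :=
  [("T50", 0, true), ("LPT", 0, true),
   ("T30", 1, true), ("HPC", 1, true),
   ("P30", 2, true), ("P15", 2, true),
   ("Nf", 3, true), ("Nc", 3, true),
   ("fuel", 4, false), ("phi", 4, true)]

-- _category: min over all matching keywords' categories (min(matches) if matches else None)
def pvCategory (sensor : String) : Option Int :=
  let low := PySem.Str.lower sensor
  let ms := pvKeywords.filterMap
    (fun p => if PySem.Str.isIn p.1 (if p.2.2 then sensor else low) then some p.2.1 else none)
  PySem.List.min? ms (fun x => x)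

def identify_required_parts_py_alt (top_features : List (List (String × String))) : List String :=
  let cats := (top_features.take 3).foldl
    (fun acc feature =>
      match pvCategory ((feature.lookup "name").getD "") with
      | none => acc
      | some c => if c ∈ acc then acc else acc ++ [c]) []
  let parts := cats.flatMap (fun c => ((pvCatParts.lookup c).getD []))
  if parts = [] then ["To be determined based on inspection findings"] else parts

-- ===== PRECONDITION & SPEC =====
-- Pre_ excludes features among the first three without a 'name' key, where Python A raises KeyError.
def Pre_identify_required_parts_py (top_features : List (List (String × String))) : Prop :=
  ((top_features.take 3).all (fun feature => (feature.lookup "name").isSome)) = true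
instance (top_features : List (List (String × String))) : Decidable (Pre_identify_required_parts_py top_features) := by unfold Pre_identify_required_parts_py; infer_instance
def pvWitness_identify_required_parts_py : (List (List (String × String))) := [[("name", "T50")], [("name", "phi")]]
def Spec_identify_required_parts_py (top_features : List (List (String × String))) (out : List String) : Prop := out = identify_required_parts_py_alt top_features
instance (top_features : List (List (String × String))) (out : List String) : Decidable (Spec_identify_required_parts_py top_features out) := by unfold Spec_identify_required_parts_py; infer_instance

-- ===== CLAIM (what is proved, stated in full; the proofs are below) =====
def Claim_equal_identify_required_parts_py : Prop := ∀ (top_features : List (List (String × String))), Dom_identify_required_parts_py top_features → Pre_identify_required_parts_py top_features → Spec_identify_required_parts_py top_features (identify_required_parts_py top_features)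

-- ===== LEMMAS AND PROOFS =====
-- the per-category part block, as B expands it
def pvBlock (c : Option Int) : List String :=
  match c with
  | none => []
  | some c => (pvCatParts.lookup c).getD []

-- B's min-over-keywords category yields exactly A's cascade block, and is one of the six possible values.
-- foldl min over elements all ≥ the accumulator keeps the accumulator
theorem pvFoldlMin_eq {x : Int} {l : List Int} (h : ∀ y ∈ l, x ≤ y) :
    l.foldl min x = x := by
  induction l generalizing x with
  | nil => rfl
  | cons a t ih =>
    have hx : min x a = x := min_eq_left (h a (by simp))
    simp only [List.foldl, hx]
    exact ih (fun y hy => h y (by simp [hy]))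

-- min over the matched categories of an ascending keyword list is the first match
theorem pvMin?_filterMap_eq_findSome? {α : Type} (g : α → Bool) (c : α → Int) :
    ∀ (l : List α), l.Pairwise (fun p q => c p ≤ c q) →
      PySem.List.min? (l.filterMap (fun p => if g p then some (c p) else none)) (fun x => x)
        = l.findSome? (fun p => if g p then some (c p) else none) := by
  intro l h
  induction l with
  | nil => rfl
  | cons p rest ih =>
    rcases List.pairwise_cons.mp h with ⟨hle, hrest⟩
    by_cases hg : g p = true
    · simp only [List.filterMap_cons, List.findSome?_cons, hg, reduceIte]
      rw [PySem.List.min?_id_cons]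
      congr 1
      apply pvFoldlMin_eq
      intro y hy
      rcases List.mem_filterMap.mp hy with ⟨q, hq, hfq⟩
      have : y = c q := by
        by_cases hgq : g q = true
        · simpa [hgq] using hfq.symm
        · simp [hgq] at hfq
      exact this ▸ hle q hq
    · simp only [List.filterMap_cons, List.findSome?_cons, hg]
      simpa [hg] using ih hrest

-- pvCategory as a first-match cascade over the keyword table
theorem pvCategory_eq (s : String) :
    pvCategory s = pvKeywords.findSome?
      (fun p => if PySem.Str.isIn p.1 (if p.2.2 then s else PySem.Str.lower s) then some p.2.1 else none) := by
  have hpw : pvKeywords.Pairwise (fun p q => p.2.1 ≤ q.2.1) := by decide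
  have h := pvMin?_filterMap_eq_findSome?
    (fun p => PySem.Str.isIn p.1 (if p.2.2 then s else PySem.Str.lower s))
    (fun p => p.2.1) pvKeywords hpw
  exact h

-- B's min-over-keywords category yields exactly A's cascade block, and is one of the six possible values.
theorem pvCategory_spec (s : String) :
    pvPartsA s = pvBlock (pvCategory s) ∧
      pvCategory s ∈ ([none, some 0, some 1, some 2, some 3, some 4] : List (Option Int)) := by
  cases h1 : PySem.Chars.isIn ['T', '5', '0'] s.toList with
  | true => simp [pvCategory_eq, pvKeywords, List.findSome?, pvPartsA, pvBlock, pvCatParts, List.lookup, h1]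
  | false =>
    cases h2 : PySem.Chars.isIn ['L', 'P', 'T'] s.toList with
    | true => simp [pvCategory_eq, pvKeywords, List.findSome?, pvPartsA, pvBlock, pvCatParts, List.lookup, h1, h2]
    | false =>
      cases h3 : PySem.Chars.isIn ['T', '3', '0'] s.toList with
      | true => simp [pvCategory_eq, pvKeywords, List.findSome?, pvPartsA, pvBlock, pvCatParts, List.lookup, h1, h2, h3]
      | false =>
        cases h4 : PySem.Chars.isIn ['H', 'P', 'C'] s.toList with
        | true => simp [pvCategory_eq, pvKeywords, List.findSome?, pvPartsA, pvBlock, pvCatParts, List.lookup, h1, h2, h3, h4]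
        | false =>
          cases h5 : PySem.Chars.isIn ['P', '3', '0'] s.toList with
          | true => simp [pvCategory_eq, pvKeywords, List.findSome?, pvPartsA, pvBlock, pvCatParts, List.lookup, h1, h2, h3, h4, h5]
          | false =>
            cases h6 : PySem.Chars.isIn ['P', '1', '5'] s.toList with
            | true => simp [pvCategory_eq, pvKeywords, List.findSome?, pvPartsA, pvBlock, pvCatParts, List.lookup, h1, h2, h3, h4, h5, h6]
            | false =>
              cases h7 : PySem.Chars.isIn ['N', 'f'] s.toList with
              | true => simp [pvCategory_eq, pvKeywords, List.findSome?, pvPartsA, pvBlock, pvCatParts, List.lookup, h1, h2, h3, h4, h5, h6, h7]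
              | false =>
                cases h8 : PySem.Chars.isIn ['N', 'c'] s.toList with
                | true => simp [pvCategory_eq, pvKeywords, List.findSome?, pvPartsA, pvBlock, pvCatParts, List.lookup, h1, h2, h3, h4, h5, h6, h7, h8]
                | false =>
                  cases h9 : PySem.Chars.isIn ['f', 'u', 'e', 'l'] (PySem.Chars.lower s.toList) with
                  | true => simp [pvCategory_eq, pvKeywords, List.findSome?, pvPartsA, pvBlock, pvCatParts, List.lookup, h1, h2, h3, h4, h5, h6, h7, h8, h9]
                  | false =>
                    cases h10 : PySem.Chars.isIn ['p', 'h', 'i'] s.toList with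
                    | true => simp [pvCategory_eq, pvKeywords, List.findSome?, pvPartsA, pvBlock, pvCatParts, List.lookup, h1, h2, h3, h4, h5, h6, h7, h8, h9, h10]
                    | false => simp [pvCategory_eq, pvKeywords, List.findSome?, pvPartsA, pvBlock, pvCatParts, List.lookup, h1, h2, h3, h4, h5, h6, h7, h8, h9, h10]

-- the whole computation for ≤3 features, abstracted over their categories (none pads a shorter list)
def pvA3 (c1 c2 c3 : Option Int) : List String :=
  let u := PySem.List.dedup (pvBlock c1 ++ pvBlock c2 ++ pvBlock c3)
  if u = [] then ["To be determined based on inspection findings"] else u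

def pvB3 (c1 c2 c3 : Option Int) : List String :=
  let step := fun (acc : List Int) (c : Option Int) =>
    match c with
    | none => acc
    | some c => if c ∈ acc then acc else acc ++ [c]
  let cats := step (step (step [] c1) c2) c3
  let parts := cats.flatMap (fun c => ((pvCatParts.lookup c).getD []))
  if parts = [] then ["To be determined based on inspection findings"] else parts

theorem pvA3_eq_pvB3 :
    ∀ c1 ∈ ([none, some 0, some 1, some 2, some 3, some 4] : List (Option Int)),
    ∀ c2 ∈ ([none, some 0, some 1, some 2, some 3, some 4] : List (Option Int)),
    ∀ c3 ∈ ([none, some 0, some 1, some 2, some 3, some 4] : List (Option Int)),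
      pvA3 c1 c2 c3 = pvB3 c1 c2 c3 := by
  decide

-- ===== VERDICT (by name: the statement is the Claim_ definition above) =====
theorem identify_required_parts_py_spec : Claim_equal_identify_required_parts_py := by
  intro tf _ _
  unfold Spec_identify_required_parts_py identify_required_parts_py identify_required_parts_py_alt
  rcases tf with _ | ⟨a, _ | ⟨b, _ | ⟨c, rest⟩⟩⟩
  · rfl
  · obtain ⟨hA1, hm1⟩ := pvCategory_spec ((a.lookup "name").getD "")
    have h := pvA3_eq_pvB3 _ hm1 none (by decide) none (by decide)
    simpa [pvA3, pvB3, pvBlock, hA1] using h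
  · obtain ⟨hA1, hm1⟩ := pvCategory_spec ((a.lookup "name").getD "")
    obtain ⟨hA2, hm2⟩ := pvCategory_spec ((b.lookup "name").getD "")
    have h := pvA3_eq_pvB3 _ hm1 _ hm2 none (by decide)
    simpa [pvA3, pvB3, pvBlock, hA1, hA2] using h
  · obtain ⟨hA1, hm1⟩ := pvCategory_spec ((a.lookup "name").getD "")
    obtain ⟨hA2, hm2⟩ := pvCategory_spec ((b.lookup "name").getD "")
    obtain ⟨hA3, hm3⟩ := pvCategory_spec ((c.lookup "name").getD "")
    have h := pvA3_eq_pvB3 _ hm1 _ hm2 _ hm3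
    simpa [pvA3, pvB3, pvBlock, hA1, hA2, hA3] using h
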